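-- pv_equiv track=rewrite | github.com/mawentao277/PR-Embedding | word-alignment/preprocess.py | find_align_index
-- ===== SOURCE A (Python) =====
-- def find_align_index(post_tokens, reply_tokens, p2r_dict, reverse=False):
--     p_tgt = []
--     for p_w in post_tokens:
--         p_preds = []
--         has_score = False
--         for r_w in reply_tokens:
--             key = None
--             if reverse:
--                 key = (r_w, p_w)
--             else:
--                 key = (p_w, r_w)
--             if key in p2r_dict:
--                 score = p2r_dict[key]
--                 p_preds.append(score)
--                 has_score = True
--             else:
--                 p_preds.append(0)
--         if has_score:
--             p_tgt.append(p_preds.index(max(p_preds)))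
--         else:
--             p_tgt.append(-1)
--     return p_tgt
-- ===== SOURCE B (Python) =====
-- def find_align_index(post_tokens, reply_tokens, p2r_dict, reverse=False):
--     out = []
--     for p_w in post_tokens:
--         best_idx = -1
--         best_score = None
--         has_score = False
--         for i, r_w in enumerate(reply_tokens):
--             key = (r_w, p_w) if reverse else (p_w, r_w)
--             if key in p2r_dict:
--                 score = p2r_dict[key]
--                 has_score = True
--             else:
--                 score = 0
--             if best_score is None or score > best_score:
--                 best_score = score
--                 best_idx = i
--         out.append(best_idx if has_score else -1)
--     return out
-- ===== Notes on version B (the rewrite author's own statement) =====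
-- stated objective: alternative
-- what changed: Replaces A's per-post-token build-a-score-list-then-max()-then-.index() (three passes and a temporary list) with a single running-argmax pass over reply_tokens keeping best_idx/best_score/has_score in O(1) extra space.
import Mathlib
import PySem

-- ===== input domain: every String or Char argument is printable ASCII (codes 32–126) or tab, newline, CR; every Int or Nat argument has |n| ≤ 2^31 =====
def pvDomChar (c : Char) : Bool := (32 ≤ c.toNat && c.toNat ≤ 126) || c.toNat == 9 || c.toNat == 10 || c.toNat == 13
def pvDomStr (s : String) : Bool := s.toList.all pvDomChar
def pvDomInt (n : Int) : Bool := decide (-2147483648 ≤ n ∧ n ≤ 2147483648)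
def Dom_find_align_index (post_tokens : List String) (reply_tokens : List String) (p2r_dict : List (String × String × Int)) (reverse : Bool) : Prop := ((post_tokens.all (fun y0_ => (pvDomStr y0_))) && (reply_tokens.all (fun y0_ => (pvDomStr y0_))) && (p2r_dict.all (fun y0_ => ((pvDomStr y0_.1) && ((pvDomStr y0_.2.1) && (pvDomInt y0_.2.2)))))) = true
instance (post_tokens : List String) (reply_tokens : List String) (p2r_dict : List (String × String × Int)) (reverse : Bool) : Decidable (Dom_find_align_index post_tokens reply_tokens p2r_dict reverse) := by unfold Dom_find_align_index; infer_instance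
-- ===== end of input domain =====

-- B replaces A's per-token list build + max() + .index() (three passes and a temporary list)
-- with a single running-argmax pass over reply_tokens in O(1) extra space (objective: alternative).

-- ===== PORT A =====
-- dict[(str,str)] -> int as association list: first-match lookup (helper shared by both ports)
def pvLookup (d : List (String × String × Int)) (k : String × String) : Option Int :=
  match d with
  | [] => none
  | (a, b, v) :: t => if a = k.1 ∧ b = k.2 then some v else pvLookup t k

def find_align_index (post_tokens : List String) (reply_tokens : List String) (p2r_dict : List (String × String × Int)) (reverse : Bool) : List Int :=
  post_tokens.foldl (fun p_tgt p_w =>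
    let st := reply_tokens.foldl (fun (st : List Int × Bool) r_w =>
      let key := if reverse then (r_w, p_w) else (p_w, r_w)
      match pvLookup p2r_dict key with
      | some score => (st.1 ++ [score], true)
      | none => (st.1 ++ [0], st.2)) ([], false)
    if st.2 then
      match PySem.List.max? st.1 (fun y => y) with
      | some m => p_tgt ++ [(((PySem.List.index? st.1 m).getD 0 : Nat) : Int)]
      | none => p_tgt ++ [-1]   -- unreachable: st.2 = true forces st.1 ≠ []
    else p_tgt ++ [-1]) []

-- ===== PORT B =====
def find_align_index_alt (post_tokens : List String) (reply_tokens : List String) (p2r_dict : List (String × String × Int)) (reverse : Bool) : List Int :=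
  post_tokens.foldl (fun out p_w =>
    let st := (PySem.List.enumerate reply_tokens 0).foldl
      (fun (st : Int × Option Int × Bool) ir =>
        let key := if reverse then (ir.2, p_w) else (p_w, ir.2)
        let sh : Int × Bool := match pvLookup p2r_dict key with
          | some score => (score, true)
          | none => (0, st.2.2)
        match st.2.1 with
        | none => (ir.1, some sh.1, sh.2)
        | some b => if b < sh.1 then (ir.1, some sh.1, sh.2) else (st.1, st.2.1, sh.2))
      (-1, none, false)
    out ++ [if st.2.2 then st.1 else -1]) []

-- ===== PRECONDITION & SPEC =====
def Spec_find_align_index (post_tokens : List String) (reply_tokens : List String) (p2r_dict : List (String × String × Int)) (reverse : Bool) (out : List Int) : Prop := out = find_align_index_alt post_tokens reply_tokens p2r_dict reverse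
instance (post_tokens : List String) (reply_tokens : List String) (p2r_dict : List (String × String × Int)) (reverse : Bool) (out : List Int) : Decidable (Spec_find_align_index post_tokens reply_tokens p2r_dict reverse out) := by unfold Spec_find_align_index; infer_instance

-- ===== CLAIM (what is proved, stated in full; the proofs are below) =====
def Claim_equal_find_align_index : Prop := ∀ (post_tokens : List String) (reply_tokens : List String) (p2r_dict : List (String × String × Int)) (reverse : Bool), Dom_find_align_index post_tokens reply_tokens p2r_dict reverse → Spec_find_align_index post_tokens reply_tokens p2r_dict reverse (find_align_index post_tokens reply_tokens p2r_dict reverse)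

-- ===== LEMMAS AND PROOFS =====

-- the key built for post word p and reply word r
def pvKey (reverse : Bool) (p r : String) : String × String :=
  if reverse then (r, p) else (p, r)
-- the defaulted score of a reply word (0 when the key is missing)
def pvSc (d : List (String × String × Int)) (reverse : Bool) (p r : String) : Int :=
  (pvLookup d (pvKey reverse p r)).getD 0
-- whether the key is present
def pvHs (d : List (String × String × Int)) (reverse : Bool) (p r : String) : Bool :=
  (pvLookup d (pvKey reverse p r)).isSome

-- abstract running argmax (index, value) on a list of scores, starting index i
def pvRun : List Int → Int → Int → Int → Int × Int
  | [], _, bi, b => (bi, b)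
  | x :: t, i, bi, b => if b < x then pvRun t (i+1) i x else pvRun t (i+1) bi b

-- A's inner loop builds the score list and the has flag
theorem aInner_eq (d : List (String × String × Int)) (rev : Bool) (p : String) :
    ∀ (l : List String) (acc : List Int) (h : Bool),
      l.foldl (fun (st : List Int × Bool) r_w =>
        let key := if rev then (r_w, p) else (p, r_w)
        match pvLookup d key with
        | some score => (st.1 ++ [score], true)
        | none => (st.1 ++ [0], st.2)) (acc, h)
      = (acc ++ l.map (pvSc d rev p), h || l.any (pvHs d rev p)) := by
  intro l
  induction l with
  | nil => intro acc h; simp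
  | cons r t ih =>
    intro acc h
    simp only [List.foldl_cons, List.map_cons, List.any_cons]
    by_cases hk : (pvLookup d (if rev then (r, p) else (p, r))).isSome
    · obtain ⟨s, hs⟩ := Option.isSome_iff_exists.mp hk
      simp only [ih, pvSc, pvHs, pvKey]
      simp [hs]
    · rw [Option.not_isSome_iff_eq_none] at hk
      simp only [ih, pvSc, pvHs, pvKey]
      simp [hk]

-- B's inner loop, once the best is set, is pvRun on the score list (plus the has flag)
theorem bInner_eq (d : List (String × String × Int)) (rev : Bool) (p : String) :
    ∀ (l : List String) (i bi b : Int) (h : Bool),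
      (PySem.List.enumerate l i).foldl
        (fun (st : Int × Option Int × Bool) ir =>
          let key := if rev then (ir.2, p) else (p, ir.2)
          let sh : Int × Bool := match pvLookup d key with
            | some score => (score, true)
            | none => (0, st.2.2)
          match st.2.1 with
          | none => (ir.1, some sh.1, sh.2)
          | some b => if b < sh.1 then (ir.1, some sh.1, sh.2) else (st.1, st.2.1, sh.2))
        (bi, some b, h)
      = ((pvRun (l.map (pvSc d rev p)) i bi b).1,
         some (pvRun (l.map (pvSc d rev p)) i bi b).2,
         h || l.any (pvHs d rev p)) := by
  intro l
  induction l with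
  | nil => intro i bi b h; simp [pvRun]
  | cons r t ih =>
    intro i bi b h
    rw [PySem.List.enumerate_cons]
    simp only [List.foldl_cons, List.map_cons, List.any_cons, pvRun]
    by_cases hk : (pvLookup d (if rev then (r, p) else (p, r))).isSome
    · obtain ⟨s, hs⟩ := Option.isSome_iff_exists.mp hk
      have hsc : pvSc d rev p r = s := by simp [pvSc, pvKey, hs]
      have hhs : pvHs d rev p r = true := by simp [pvHs, pvKey, hs]
      simp only [hs, hsc, hhs, Bool.or_true, Bool.true_or]
      by_cases hlt : b < s
      · simp [hlt, ih]
      · simp [hlt, ih]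
    · rw [Option.not_isSome_iff_eq_none] at hk
      have hsc : pvSc d rev p r = 0 := by simp [pvSc, pvKey, hk]
      have hhs : pvHs d rev p r = false := by simp [pvHs, pvKey, hk]
      simp only [hk, hsc, hhs, Bool.false_or]
      by_cases hlt : b < 0
      · simp [hlt, ih]
      · simp [hlt, ih]

-- pvRun computes the (first-occurrence) argmax index and the running max
theorem pvRun_spec (t : List Int) :
    ∀ (pre : List Int) (a : Int),
      pvRun t (1 + (pre.length : Int)) (((PySem.List.index? (a :: pre) (pre.foldl max a)).getD 0 : Nat) : Int) (pre.foldl max a)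
      = ((((PySem.List.index? (a :: (pre ++ t)) ((pre ++ t).foldl max a)).getD 0 : Nat) : Int), (pre ++ t).foldl max a) := by
  induction t with
  | nil => intro pre a; simp [pvRun]
  | cons x t ih =>
    intro pre a
    simp only [pvRun]
    have hmem : pre.foldl max a ∈ a :: pre := by
      rcases PySem.List.foldl_max_mem pre a with h | h
      · rw [h]; exact List.mem_cons_self
      · exact List.mem_cons_of_mem _ h
    have hub : ∀ y ∈ a :: pre, y ≤ pre.foldl max a := by
      intro y hy
      rcases List.mem_cons.mp hy with h | h
      · rw [h]; exact (PySem.List.le_foldl_max pre a).1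
      · exact (PySem.List.le_foldl_max pre a).2 y h
    by_cases hlt : pre.foldl max a < x
    · -- new strict max: index is the current position, value becomes x
      have hfold : (pre ++ [x]).foldl max a = x := by
        rw [List.foldl_append]; simp [max_eq_right (le_of_lt hlt)]
      have hnm : x ∉ a :: pre := fun hmemx => absurd (hub x hmemx) (not_le.mpr hlt)
      have hidx : PySem.List.index? ((a :: pre) ++ [x]) x = some (a :: pre).length :=
        PySem.List.index?_append_singleton_self _ x hnm
      have hthis := ih (pre ++ [x]) a
      rw [hfold] at hthis
      rw [List.cons_append] at hidx
      rw [hidx] at hthis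
      simp only [Option.getD_some] at hthis
      simp only [if_pos hlt]
      rw [show pre ++ x :: t = pre ++ [x] ++ t by simp]
      rw [show (1 : Int) + (pre.length : Int) + 1 = 1 + ((pre ++ [x]).length : Int) by
        simp [List.length_append]; ring]
      rw [show (1 : Int) + (pre.length : Int) = (((a :: pre).length : Nat) : Int) by
        simp; ring]
      exact hthis
    · -- max unchanged: index unchanged
      have hle : x ≤ pre.foldl max a := not_lt.mp hlt
      have hfold : (pre ++ [x]).foldl max a = pre.foldl max a := by
        rw [List.foldl_append]; simp [max_eq_left hle]
      have hidx : PySem.List.index? ((a :: pre) ++ [x]) (pre.foldl max a)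
          = PySem.List.index? (a :: pre) (pre.foldl max a) :=
        PySem.List.index?_append_of_mem _ hmem
      have hthis := ih (pre ++ [x]) a
      rw [hfold] at hthis
      rw [List.cons_append] at hidx
      rw [hidx] at hthis
      simp only [if_neg hlt]
      rw [show pre ++ x :: t = pre ++ [x] ++ t by simp]
      rw [show (1 : Int) + (pre.length : Int) + 1 = 1 + ((pre ++ [x]).length : Int) by
        simp [List.length_append]; ring]
      exact hthis

-- the element A appends for one post token (A's inner computation)
def pvEltA (d : List (String × String × Int)) (rev : Bool) (p : String) (l : List String) : Int :=
  let st := l.foldl (fun (st : List Int × Bool) r_w =>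
      let key := if rev then (r_w, p) else (p, r_w)
      match pvLookup d key with
      | some score => (st.1 ++ [score], true)
      | none => (st.1 ++ [0], st.2)) ([], false)
  if st.2 then
    match PySem.List.max? st.1 (fun y => y) with
    | some m => (((PySem.List.index? st.1 m).getD 0 : Nat) : Int)
    | none => -1
  else -1

-- the element B appends for one post token (B's inner computation)
def pvEltB (d : List (String × String × Int)) (rev : Bool) (p : String) (l : List String) : Int :=
  let st := (PySem.List.enumerate l 0).foldl
      (fun (st : Int × Option Int × Bool) ir =>
        let key := if rev then (ir.2, p) else (p, ir.2)
        let sh : Int × Bool := match pvLookup d key with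
          | some score => (score, true)
          | none => (0, st.2.2)
        match st.2.1 with
        | none => (ir.1, some sh.1, sh.2)
        | some b => if b < sh.1 then (ir.1, some sh.1, sh.2) else (st.1, st.2.1, sh.2))
      (-1, none, false)
  if st.2.2 then st.1 else -1

-- per-post-token equality of the two inner computations
theorem inner_eq (d : List (String × String × Int)) (rev : Bool) (p : String) (l : List String) :
    pvEltA d rev p l = pvEltB d rev p l := by
  unfold pvEltA pvEltB
  cases l with
  | nil => simp
  | cons r t =>
    rw [aInner_eq d rev p (r :: t) [] false]
    rw [PySem.List.enumerate_cons, List.foldl_cons]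
    simp only [zero_add]
    cases hk : pvLookup d (if rev then (r, p) else (p, r)) with
    | none =>
      have hsc : pvSc d rev p r = 0 := by simp [pvSc, pvKey, hk]
      have hhs : pvHs d rev p r = false := by simp [pvHs, pvKey, hk]
      simp only []
      rw [bInner_eq d rev p t 1 0 0 false]
      simp only [List.map_cons, List.any_cons, hsc, hhs, Bool.false_or, List.nil_append]
      rw [PySem.List.max?_id_cons]
      have h := pvRun_spec (t.map (pvSc d rev p)) [] 0
      simp only [List.length_nil, List.foldl_nil, List.nil_append,
        PySem.List.index?_cons_self, Option.getD_some, Nat.cast_zero, add_zero] at h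
      rw [h]
    | some s =>
      have hsc : pvSc d rev p r = s := by simp [pvSc, pvKey, hk]
      have hhs : pvHs d rev p r = true := by simp [pvHs, pvKey, hk]
      simp only []
      rw [bInner_eq d rev p t 1 0 s true]
      simp only [List.map_cons, List.any_cons, hsc, hhs, Bool.true_or, Bool.false_or,
        List.nil_append, if_true]
      rw [PySem.List.max?_id_cons]
      have h := pvRun_spec (t.map (pvSc d rev p)) [] s
      simp only [List.length_nil, List.foldl_nil, List.nil_append,
        PySem.List.index?_cons_self, Option.getD_some, Nat.cast_zero, add_zero] at h
      rw [h]

-- A's outer-loop body appends pvEltA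
theorem stepA (d : List (String × String × Int)) (rev : Bool) (reply : List String)
    (acc : List Int) (p : String) :
    (let st := reply.foldl (fun (st : List Int × Bool) r_w =>
        let key := if rev then (r_w, p) else (p, r_w)
        match pvLookup d key with
        | some score => (st.1 ++ [score], true)
        | none => (st.1 ++ [0], st.2)) ([], false)
     if st.2 then
       match PySem.List.max? st.1 (fun y => y) with
       | some m => acc ++ [(((PySem.List.index? st.1 m).getD 0 : Nat) : Int)]
       | none => acc ++ [-1]
     else acc ++ [-1])
    = acc ++ [pvEltA d rev p reply] := by
  unfold pvEltA
  cases h2 : (reply.foldl (fun (st : List Int × Bool) r_w =>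
        let key := if rev then (r_w, p) else (p, r_w)
        match pvLookup d key with
        | some score => (st.1 ++ [score], true)
        | none => (st.1 ++ [0], st.2)) ([], false)).2 with
  | false => simp only [h2, Bool.false_eq_true, if_false]
  | true =>
    simp only [h2, if_true]
    cases hm : PySem.List.max? (reply.foldl (fun (st : List Int × Bool) r_w =>
        let key := if rev then (r_w, p) else (p, r_w)
        match pvLookup d key with
        | some score => (st.1 ++ [score], true)
        | none => (st.1 ++ [0], st.2)) ([], false)).1 (fun y => y) with
    | none => simp
    | some m => simp

-- ===== VERDICT (by name: the statement is the Claim_ definition above) =====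
theorem find_align_index_spec : Claim_equal_find_align_index := by
  intro post reply d rev _
  unfold Spec_find_align_index find_align_index find_align_index_alt
  rw [PySem.List.foldl_congr_mem post _
        (fun acc p_w => acc ++ [pvEltA d rev p_w reply]) []
        (fun acc p _ => stepA d rev reply acc p)]
  rw [PySem.List.foldl_append_singleton_eq_map, PySem.List.foldl_append_singleton_eq_map]
  simp only [List.nil_append]
  exact List.map_congr_left (fun p _ => inner_eq d rev p reply)
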